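-- pv_equiv track=rewrite | github.com/harisawan27/AI_Employee_Vault | api/utils/file_parser.py | extract_editable_content
-- ===== SOURCE A (Python) =====
-- def extract_editable_content(content: str, action_type: str = "") -> str:
--     """Extract the main editable draft body from content.
--
--     Strips metadata sections and instructions, returning just the draft text.
--     """
--     lines = content.split("\n")
--     in_draft = False
--     draft_lines = []
--
--     for line in lines:
--         # Common draft markers
--         if any(marker in line.lower() for marker in ["## draft", "## content", "## body", "## message"]):
--             in_draft = True
--             continue
--         if in_draft and line.startswith("## "):
--             break  # Next section
--         if in_draft:
--             draft_lines.append(line)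
--
--     if draft_lines:
--         return "\n".join(draft_lines).strip()
--
--     # No draft section found — return full content
--     return content
-- ===== SOURCE B (Python) =====
-- def extract_editable_content(content: str, action_type: str = "") -> str:
--     """Extract the main editable draft body (table-driven comprehension rewrite)."""
--     lines = content.split("\n")
--     markers = ("## draft", "## content", "## body", "## message")
--
--     def is_marker(ln):
--         low = ln.lower()
--         return any(m in low for m in markers)
--
--     def is_stop(ln):
--         # a non-marker '## ' section header ends the body
--         return not is_marker(ln) and ln.startswith("## ")
--
--     # Classification table over all lines; no stateful scan with break/continue.
--     flags = [is_marker(ln) for ln in lines]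
--     if True not in flags:
--         return content
--     tail = lines[flags.index(True) + 1:]
--     stops = [i for i, ln in enumerate(tail) if is_stop(ln)]
--     end = stops[0] if stops else len(tail)
--     body = [ln for ln in tail[:end] if not is_marker(ln)]
--     return "\n".join(body).strip() if body else content
-- ===== Notes on version B (the rewrite author's own statement) =====
-- stated objective: alternative
-- what changed: A's single stateful scan with an in_draft flag and break/continue is replaced by a table-driven dataflow formulation: a precomputed per-line marker classification table, index arithmetic (flags.index, first stop index) to delimit the body region, and comprehensions/filters to select it, with no mutable scan state.
import Mathlib
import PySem

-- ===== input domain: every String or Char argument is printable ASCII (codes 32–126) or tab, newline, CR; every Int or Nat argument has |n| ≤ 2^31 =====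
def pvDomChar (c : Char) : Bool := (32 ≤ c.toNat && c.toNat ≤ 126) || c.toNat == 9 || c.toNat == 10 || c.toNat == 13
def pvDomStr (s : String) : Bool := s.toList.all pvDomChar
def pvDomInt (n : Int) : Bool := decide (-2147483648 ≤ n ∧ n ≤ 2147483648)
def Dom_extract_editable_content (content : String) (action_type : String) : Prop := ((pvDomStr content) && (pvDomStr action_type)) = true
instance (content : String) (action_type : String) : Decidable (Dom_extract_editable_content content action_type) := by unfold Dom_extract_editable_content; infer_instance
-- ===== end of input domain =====

-- B replaces A's stateful scan (in_draft flag, break/continue) by a table-driven formulation: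
-- a per-line marker classification table plus index arithmetic and comprehensions; objective: alternative, same cost.


-- ===== PORT A =====
-- "any(marker in line.lower() for marker in [...])" (the same helper occurs in both Pythons)
def pvIsMarker (line : String) : Bool :=
  ["## draft", "## content", "## body", "## message"].any
    (fun m => PySem.Str.isIn m (PySem.Str.lower line))

-- A's loop: state (in_draft, draft_lines); 'break' returns the accumulator.
def pvLoopA : List String → Bool → List String → List String
  | [], _, acc => acc
  | l :: rest, inDraft, acc =>
    if pvIsMarker l then pvLoopA rest true acc
    else if inDraft && PySem.Str.startswith l "## " then acc
    else if inDraft then pvLoopA rest inDraft (acc ++ [l])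
    else pvLoopA rest inDraft acc

def extract_editable_content (content : String) (action_type : String) : String :=
  -- content.split("\n"): sep ≠ "" so Str.split? is always some; exact
  let lines := (PySem.Str.split? content "\n").getD []
  let draft_lines := pvLoopA lines false []
  if draft_lines ≠ [] then PySem.Str.strip (PySem.Str.join "\n" draft_lines)
  else content

-- ===== PORT B =====
-- Source B's is_stop helper: a non-marker '## ' section header
def pvIsStop (ln : String) : Bool :=
  !pvIsMarker ln && PySem.Str.startswith ln "## "

def extract_editable_content_alt (content : String) (action_type : String) : String :=
  -- content.split("\n"): sep ≠ "" so Str.split? is always some; exact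
  let lines := (PySem.Str.split? content "\n").getD []
  -- flags = [is_marker(ln) for ln in lines]
  let flags := lines.map pvIsMarker
  if !(flags.contains true) then content
  else
    -- tail = lines[flags.index(True) + 1:]
    let start := (PySem.List.index? flags true).getD 0
    let tail := PySem.List.slice lines (some ((start : Int) + 1)) none
    -- stops = [i for i, ln in enumerate(tail) if is_stop(ln)]
    let stops := (PySem.List.enumerate tail).filterMap
      (fun p => if pvIsStop p.2 then some p.1 else none)
    -- end = stops[0] if stops else len(tail)
    let e := stops.headD (tail.length : Int)
    -- body = [ln for ln in tail[:end] if not is_marker(ln)]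
    let body := (PySem.List.slice tail none (some e)).filter (fun ln => !pvIsMarker ln)
    if body ≠ [] then PySem.Str.strip (PySem.Str.join "\n" body)
    else content

-- ===== PRECONDITION & SPEC =====
def Spec_extract_editable_content (content : String) (action_type : String) (out : String) : Prop := out = extract_editable_content_alt content action_type
instance (content : String) (action_type : String) (out : String) : Decidable (Spec_extract_editable_content content action_type out) := by unfold Spec_extract_editable_content; infer_instance

-- ===== CLAIM (what is proved, stated in full; the proofs are below) =====
def Claim_equal_extract_editable_content : Prop := ∀ (content : String) (action_type : String), Dom_extract_editable_content content action_type → Spec_extract_editable_content content action_type (extract_editable_content content action_type)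

-- ===== LEMMAS AND PROOFS =====
-- Proof-side middle ground: first-marker suffix and the collected body.
def pvFindMarker : List String → Option (List String)
  | [] => none
  | l :: rest => if pvIsMarker l then some rest else pvFindMarker rest

def pvCollect : List String → List String
  | [] => []
  | l :: rest =>
    if pvIsMarker l then pvCollect rest
    else if PySem.Str.startswith l "## " then []
    else l :: pvCollect rest

-- B's stops list with a general enumerate start.
def pvStopsAux (s : Int) (tail : List String) : List Int :=
  (PySem.List.enumerate tail s).filterMap
    (fun p => if pvIsStop p.2 then some p.1 else none)

theorem pvStopsAux_cons (s : Int) (l : String) (t : List String) :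
    pvStopsAux s (l :: t) =
      (if pvIsStop l then [s] else []) ++ pvStopsAux (s + 1) t := by
  by_cases h : pvIsStop l = true <;>
    simp [pvStopsAux, PySem.List.enumerate_cons, h]

theorem pvStopsAux_ge (t : List String) : ∀ (s x : Int), x ∈ pvStopsAux s t → s ≤ x := by
  induction t with
  | nil => intro s x h; simp [pvStopsAux, PySem.List.enumerate_nil] at h
  | cons l t ih =>
    intro s x h
    rw [pvStopsAux_cons] at h
    rcases List.mem_append.mp h with h | h
    · split at h <;> simp at h; omega
    · have := ih (s + 1) x h; omega

theorem pvStopsAux_shift (t : List String) : ∀ (s : Int),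
    pvStopsAux s t = (pvStopsAux 0 t).map (· + s) := by
  induction t with
  | nil => intro s; simp [pvStopsAux, PySem.List.enumerate_nil]
  | cons l t ih =>
    intro s
    rw [pvStopsAux_cons, pvStopsAux_cons, ih (s + 1), ih (0 + 1)]
    by_cases h : pvIsStop l = true <;>
      simp [h, List.map_map] <;> (intro a _; omega)

-- B's body computation over the suffix equals pvCollect.
theorem pvBody_eq_collect (t : List String) :
    (PySem.List.slice t none (some ((pvStopsAux 0 t).headD (t.length : Int)))).filter
      (fun ln => !pvIsMarker ln) = pvCollect t := by
  induction t with
  | nil =>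
    rw [show ((pvStopsAux 0 ([] : List String)).headD (([] : List String).length : Int)) = (0 : Int) by
          simp [pvStopsAux, PySem.List.enumerate_nil],
        PySem.List.slice_to _ (by omega)]
    simp [pvCollect]
  | cons l t ih =>
    rw [pvStopsAux_cons, pvStopsAux_shift t (0 + 1)]
    by_cases hstop : pvIsStop l = true
    · have hm : pvIsMarker l = false := by
        cases hml : pvIsMarker l <;> simp [pvIsStop, hml] at hstop ⊢
      have hs : PySem.Chars.startswith l.toList ['#', '#', ' '] = true := by
        simpa [pvIsStop, hm, PySem.Str.startswith] using hstop
      rw [hstop]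
      simp only [if_true, List.singleton_append, List.headD_cons]
      rw [PySem.List.slice_to _ (by omega)]
      simp [pvCollect, hm, hs]
    · have het : 0 ≤ (pvStopsAux 0 t).headD (t.length : Int) := by
        cases h : pvStopsAux 0 t with
        | nil => simp
        | cons a _ => simpa using pvStopsAux_ge t 0 a (by simp [h])
      have he : ((pvStopsAux 0 t).map (· + (0 + 1))).headD ((l :: t).length : Int)
          = (pvStopsAux 0 t).headD (t.length : Int) + 1 := by
        cases pvStopsAux 0 t <;> simp
      rw [if_neg hstop, List.nil_append, he, PySem.List.slice_to _ (by omega)]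
      rw [PySem.List.slice_to _ het] at ih
      have htn : ((pvStopsAux 0 t).headD (t.length : Int) + 1).toNat
          = ((pvStopsAux 0 t).headD (t.length : Int)).toNat + 1 := by omega
      rw [htn, List.take_succ_cons]
      by_cases hm : pvIsMarker l = true
      · simp only [List.filter_cons, hm, Bool.not_true, pvCollect, if_true]
        exact ih
      · have hm' : pvIsMarker l = false := by simpa using hm
        have hs : PySem.Chars.startswith l.toList ['#', '#', ' '] = false := by
          cases hsl : PySem.Chars.startswith l.toList ['#', '#', ' ']
          · rfl
          · exact absurd (by simp [pvIsStop, hm', PySem.Str.startswith, hsl]) hstop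
        simp only [List.filter_cons, hm', Bool.not_false, pvCollect,
          Bool.false_eq_true, if_false, if_true]
        rw [if_neg (by simp [PySem.Str.startswith, hs])]
        exact congrArg (l :: ·) ih

-- B's phase 1 (contains/index?/slice) computes pvFindMarker.
theorem pvFindMarker_eq (lines : List String) :
    pvFindMarker lines =
      (PySem.List.index? (lines.map pvIsMarker) true).map
        (fun k => lines.drop (k + 1)) := by
  induction lines with
  | nil => simp [pvFindMarker, PySem.List.index?]
  | cons l rest ih =>
    by_cases hm : pvIsMarker l = true
    · rw [List.map_cons, hm, PySem.List.index?_cons_self]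
      simp [pvFindMarker, hm]
    · have hm' : pvIsMarker l = false := by simpa using hm
      rw [List.map_cons, hm', PySem.List.index?_cons_of_ne _ (by simp)]
      rw [show pvFindMarker (l :: rest) = pvFindMarker rest by simp [pvFindMarker, hm'], ih]
      cases PySem.List.index? (rest.map pvIsMarker) true <;> simp

theorem pvFindMarker_none_iff (lines : List String) :
    pvFindMarker lines = none ↔ ((lines.map pvIsMarker).contains true) = false := by
  rw [pvFindMarker_eq]
  cases h : PySem.List.index? (lines.map pvIsMarker) true with
  | none =>
    have hnm : true ∉ lines.map pvIsMarker :=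
      (PySem.List.index?_eq_none_iff (xs := lines.map pvIsMarker) (v := true)).mp h
    simp [hnm]
  | some k =>
    have hmem : true ∈ lines.map pvIsMarker := by
      rw [← PySem.List.index?_isSome_iff (xs := lines.map pvIsMarker) (v := true), h]
      rfl
    simp [hmem]

-- A-side: in draft mode A appends exactly what pvCollect collects.
theorem pvLoopA_true (ls : List String) (acc : List String) :
    pvLoopA ls true acc = acc ++ pvCollect ls := by
  induction ls generalizing acc with
  | nil => simp [pvLoopA, pvCollect]
  | cons l rest ih =>
    by_cases hm : pvIsMarker l
    · simp [pvLoopA, pvCollect, hm, ih]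
    · by_cases hs : PySem.Chars.startswith l.toList ['#', '#', ' '] = true
      · simp [pvLoopA, pvCollect, hm, hs]
      · simp [pvLoopA, pvCollect, hm, hs, ih]

-- Before any marker A skips lines, i.e. A's loop factors through pvFindMarker.
theorem pvLoopA_false (ls : List String) :
    pvLoopA ls false [] =
      (match pvFindMarker ls with
       | none => []
       | some rest => pvCollect rest) := by
  induction ls with
  | nil => simp [pvLoopA, pvFindMarker]
  | cons l rest ih =>
    by_cases hm : pvIsMarker l
    · simp [pvLoopA, pvFindMarker, hm, pvLoopA_true]
    · simp [pvLoopA, pvFindMarker, hm, ih]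

-- ===== VERDICT (by name: the statement is the Claim_ definition above) =====
theorem extract_editable_content_spec : Claim_equal_extract_editable_content := by
  intro content action_type _
  unfold Spec_extract_editable_content
  dsimp only [extract_editable_content, extract_editable_content_alt]
  rw [pvLoopA_false]
  set lines := (PySem.Str.split? content "\n").getD [] with hl
  by_cases hc : ((lines.map pvIsMarker).contains true) = false
  · rw [(pvFindMarker_none_iff lines).mpr hc, hc]
    simp
  · have hcT : ((lines.map pvIsMarker).contains true) = true := by
      cases h : (lines.map pvIsMarker).contains true
      · exact absurd h hc
      · rfl
    obtain ⟨k, hk⟩ : ∃ k, PySem.List.index? (lines.map pvIsMarker) true = some k := by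
      have hmem : true ∈ lines.map pvIsMarker := by simpa using hcT
      have := (PySem.List.index?_isSome_iff (xs := lines.map pvIsMarker) (v := true)).mpr hmem
      exact Option.isSome_iff_exists.mp this
    have hfm : pvFindMarker lines = some (lines.drop (k + 1)) := by
      rw [pvFindMarker_eq, hk]; rfl
    have hslice : PySem.List.slice lines (some ((k : Int) + 1)) none = lines.drop (k + 1) := by
      rw [show ((k : Int) + 1) = ((k + 1 : Nat) : Int) by push_cast; ring,
          PySem.List.slice_from_natCast]
    rw [hfm, hk, hcT]
    simp only [Option.getD_some, hslice]
    conv_rhs => rw [if_neg (by simp)]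
    rw [show ((PySem.List.enumerate (lines.drop (k + 1))).filterMap
          (fun p => if pvIsStop p.2 then some p.1 else none))
        = pvStopsAux 0 (lines.drop (k + 1)) from rfl]
    rw [pvBody_eq_collect]
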